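-- pv_equiv track=rewrite | github.com/StatGameDev/PS_Calc | tools/import_skill_tree.py | mask_nested
-- ===== SOURCE A (Python) =====
-- def mask_nested(text: str) -> str:
--     """Replace all content inside { } blocks with spaces (flattens to depth-0)."""
--     result, depth = list(text), 0
--     for i, ch in enumerate(text):
--         if ch == "{":
--             depth += 1
--             result[i] = " "
--         elif ch == "}":
--             result[i] = " "
--             depth -= 1
--         elif depth > 0:
--             result[i] = " "
--     return "".join(result)
-- ===== SOURCE B (Python) =====
-- def _mask(s: str, depth: int) -> list:
--     """Mask a segment s, given the brace depth contributed by everything before it."""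
--     if len(s) <= 1:
--         if not s:
--             return []
--         return [" " if s == "{" or s == "}" or depth > 0 else s]
--     mid = len(s) // 2
--     left = s[:mid]
--     return _mask(left, depth) + _mask(s[mid:], depth + left.count("{") - left.count("}"))
--
--
-- def mask_nested(text: str) -> str:
--     return "".join(_mask(text, 0))
-- ===== Notes on version B (the rewrite author's own statement) =====
-- stated objective: alternative
-- what changed: Replaces A's single left-to-right pass with a mutable running depth counter by a divide-and-conquer recursion: split the text in half, mask each half independently, the right half receiving its incoming depth as the left half's opening-brace count minus its closing-brace count.
import Mathlib
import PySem

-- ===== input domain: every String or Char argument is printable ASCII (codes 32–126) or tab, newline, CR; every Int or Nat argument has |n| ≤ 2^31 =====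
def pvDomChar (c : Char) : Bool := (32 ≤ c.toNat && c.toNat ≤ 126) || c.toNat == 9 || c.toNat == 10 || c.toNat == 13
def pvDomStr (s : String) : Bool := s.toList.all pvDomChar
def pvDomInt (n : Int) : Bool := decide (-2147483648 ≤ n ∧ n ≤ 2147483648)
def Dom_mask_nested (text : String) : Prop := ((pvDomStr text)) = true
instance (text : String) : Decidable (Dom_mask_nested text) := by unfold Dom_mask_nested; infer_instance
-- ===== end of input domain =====

-- B replaces A's single left-to-right pass with a mutable depth counter by a divide-and-conquer
-- recursion: split the text in half, mask each half, passing the right half the depth offset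
-- computed as the left half's brace-count difference (objective: alternative, same result).

-- ===== PORT A =====
-- A walks the text once keeping a running depth and overwrites the cell with ' ' for braces
-- and for any character seen at depth > 0; the recursion below carries the same depth state.
def maskA_go : List Char → Int → List Char
  | [], _ => []
  | c :: cs, depth =>
    if c = '{' then ' ' :: maskA_go cs (depth + 1)
    else if c = '}' then ' ' :: maskA_go cs (depth - 1)
    else if depth > 0 then ' ' :: maskA_go cs depth
    else c :: maskA_go cs depth

def mask_nested (text : String) : String := String.ofList (maskA_go text.toList 0)

-- ===== PORT B =====
-- divide and conquer: a segment of length ≤ 1 is masked directly from the incoming depth;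
-- otherwise mask both halves, the right half at depth + (left's '{' count − left's '}' count)
def maskB_go (s : List Char) (depth : Int) : List Char :=
  if _h : s.length ≤ 1 then
    match s with
    | [] => []
    | c :: _ => [if c = '{' ∨ c = '}' ∨ depth > 0 then ' ' else c]
  else
    let mid := s.length / 2
    let left := s.take mid
    maskB_go left depth ++
      maskB_go (s.drop mid) (depth + ((left.count '{' : Int) - (left.count '}' : Int)))
termination_by s.length
decreasing_by
  · simp only [List.length_take]; omega
  · simp only [List.length_drop]; omega

def mask_nested_alt (text : String) : String := String.ofList (maskB_go text.toList 0)

-- ===== PRECONDITION & SPEC =====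
def Spec_mask_nested (text : String) (out : String) : Prop := out = mask_nested_alt text
instance (text : String) (out : String) : Decidable (Spec_mask_nested text out) := by unfold Spec_mask_nested; infer_instance

-- ===== CLAIM (what is proved, stated in full; the proofs are below) =====
def Claim_equal_mask_nested : Prop := ∀ (text : String), Dom_mask_nested text → Spec_mask_nested text (mask_nested text)

-- ===== LEMMAS AND PROOFS =====
-- A's pass over an appended list: the right part starts at the depth shifted by the
-- left part's brace-count difference (A's running depth IS that prefix sum).
theorem maskA_go_append (l r : List Char) : ∀ d : Int,
    maskA_go (l ++ r) d =
      maskA_go l d ++ maskA_go r (d + ((l.count '{' : Int) - (l.count '}' : Int))) := by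
  induction l with
  | nil => intro d; simp [maskA_go]
  | cons c cs ih =>
    intro d
    by_cases h1 : c = '{'
    · simp [maskA_go, h1, ih]
      congr 1
      ring
    · by_cases h2 : c = '}'
      · simp [maskA_go, h2, ih]
        congr 1
        ring
      · have e : (((c :: cs).count '{' : Nat) : Int) - (((c :: cs).count '}' : Nat) : Int)
            = ((cs.count '{' : Int) - (cs.count '}' : Int)) := by
          simp [h1, h2]
        by_cases h3 : d > 0 <;> simp [maskA_go, h1, h2, h3, ih]

theorem maskA_go_single (c : Char) (d : Int) :
    maskA_go [c] d = [if c = '{' ∨ c = '}' ∨ d > 0 then ' ' else c] := by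
  by_cases h1 : c = '{'
  · simp [maskA_go, h1]
  · by_cases h2 : c = '}'
    · simp [maskA_go, h2]
    · by_cases h3 : d > 0 <;> simp [maskA_go, h1, h2, h3]

theorem maskB_go_eq (n : Nat) : ∀ (s : List Char), s.length = n → ∀ d : Int,
    maskB_go s d = maskA_go s d := by
  induction n using Nat.strong_induction_on with
  | _ n ih =>
    intro s hs d
    rw [maskB_go]
    by_cases h : s.length ≤ 1
    · simp only [h, dif_pos]
      match s with
      | [] => simp [maskA_go]
      | [c] => exact (maskA_go_single c d).symm
      | a :: b :: t => simp at h
    · simp only [h, dif_neg, not_false_iff]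
      have h2 : 2 ≤ s.length := by omega
      have hsplit := List.take_append_drop (s.length / 2) s
      have hl : (s.take (s.length / 2)).length = s.length / 2 := by
        simp [List.length_take]; omega
      have hr : (s.drop (s.length / 2)).length = s.length - s.length / 2 := by
        simp [List.length_drop]
      rw [ih (s.length / 2) (by omega) _ hl,
          ih (s.length - s.length / 2) (by omega) _ hr,
          ← maskA_go_append, hsplit]

-- ===== VERDICT (by name: the statement is the Claim_ definition above) =====
theorem mask_nested_spec : Claim_equal_mask_nested := by
  intro text _
  unfold Spec_mask_nested mask_nested mask_nested_alt
  rw [maskB_go_eq text.toList.length text.toList rfl]
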